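-- pv_equiv track=rewrite | github.com/BokamManikanta9/GeeksforGeeks | Difficulty: Basic/Set the rightmost unset bit/set-the-rightmost-unset-bit.py | setBit
-- ===== SOURCE A (Python) =====
-- import math
--
-- def setBit(n):
-- 	# code here
-- 	if n==0:
-- 	    return 1
-- 	z=int(math.log2(n)+1)
-- 	for i in range(z):
-- 	    if n&1<<i == 0:
-- 	        return n|1<<i
-- 	return n<<1|1
-- ===== SOURCE B (Python) =====
-- def setBit(n):
--     # closed form: setting the rightmost unset bit of n is n | (n + 1)
--     return n | (n + 1)
-- ===== Notes on version B (the rewrite author's own statement) =====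
-- stated objective: simpler
-- what changed: Replaced the log2-sized bit scan with the closed form n | (n + 1), which sets the rightmost zero bit in one bitwise operation.
import Mathlib
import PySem

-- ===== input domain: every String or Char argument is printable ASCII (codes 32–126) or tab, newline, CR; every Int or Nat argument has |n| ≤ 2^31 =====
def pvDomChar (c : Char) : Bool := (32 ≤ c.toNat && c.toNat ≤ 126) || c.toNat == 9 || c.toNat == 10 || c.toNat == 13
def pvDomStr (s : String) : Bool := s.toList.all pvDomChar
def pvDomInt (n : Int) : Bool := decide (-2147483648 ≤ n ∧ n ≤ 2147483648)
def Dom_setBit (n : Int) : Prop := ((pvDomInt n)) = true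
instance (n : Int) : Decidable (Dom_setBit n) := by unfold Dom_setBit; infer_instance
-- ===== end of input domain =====

-- B replaces A's log2-sized scan for the rightmost zero bit with the closed form n | (n + 1) (objective: simpler).

-- ===== PORT A =====
-- the for-loop over range(z): first i with n & (1 << i) == 0 returns n | (1 << i); falling off returns n << 1 | 1
def setBitLoop (n : Int) : List Nat → Int
  | [] => PySem.Int.bor (n <<< 1) 1
  | i :: rest =>
      if PySem.Int.band n ((1 : Int) <<< i) = 0 then PySem.Int.bor n ((1 : Int) <<< i)
      else setBitLoop n rest

-- z = int(math.log2(n) + 1): for 1 ≤ n ≤ 2^31 this is exactly the bit length of n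
-- (doubles carry 53 mantissa bits, so math.log2 is exact enough on this domain)
def setBit (n : Int) : Int :=
  if n = 0 then 1
  else setBitLoop n (List.range (PySem.Int.bitLength n))

-- ===== PORT B =====
def setBit_alt (n : Int) : Int := PySem.Int.bor n (n + 1)

-- ===== PRECONDITION & SPEC =====
-- Pre_ excludes n < 0, where A raises ValueError (math.log2 domain error).
def Pre_setBit (n : Int) : Prop := 0 ≤ n
instance (n : Int) : Decidable (Pre_setBit n) := by unfold Pre_setBit; infer_instance
def pvWitness_setBit : Int := (5)

def Spec_setBit (n : Int) (out : Int) : Prop := out = setBit_alt n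
instance (n : Int) (out : Int) : Decidable (Spec_setBit n out) := by unfold Spec_setBit; infer_instance

-- ===== CLAIM (what is proved, stated in full; the proofs are below) =====
def Claim_equal_setBit : Prop := ∀ (n : Int), Dom_setBit n → Pre_setBit n → Spec_setBit n (setBit n)

-- ===== LEMMAS AND PROOFS =====

-- Nat-level mirror of A's loop
def natLoop (m : Nat) : List Nat → Nat
  | [] => (m <<< 1) ||| 1
  | i :: rest => if m &&& (1 <<< i) = 0 then m ||| (1 <<< i) else natLoop m rest

theorem setBitLoop_natCast (m : Nat) (l : List Nat) :
    setBitLoop (m : Int) l = ((natLoop m l : Nat) : Int) := by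
  induction l with
  | nil =>
      show PySem.Int.bor ((m : Int) <<< 1) 1 = _
      have h1 : ((m : Int) <<< 1) = ((m <<< 1 : Nat) : Int) := rfl
      rw [h1, show (1 : Int) = ((1 : Nat) : Int) from rfl, PySem.Int.bor_natCast]
      rfl
  | cons i rest ih =>
      have hs : ((1 : Int) <<< i) = ((1 <<< i : Nat) : Int) := rfl
      show (if PySem.Int.band (m : Int) ((1 : Int) <<< i) = 0 then _ else _) = _
      rw [hs, show ((m : Int)) = ((m : Nat) : Int) from rfl]
      rw [PySem.Int.band_natCast, PySem.Int.bor_natCast]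
      by_cases h : m &&& (1 <<< i) = 0
      · simp [natLoop, h]
      · simp [natLoop, h, ih]

theorem even_lor_one (a : Nat) : (2 * a) ||| 1 = 2 * a + 1 := by
  have := Nat.lor_bit false a true 0
  simpa [Nat.bit_val, Nat.mul_comm] using this

theorem odd_lor_even (a b : Nat) : (2 * a + 1) ||| (2 * b) = 2 * (a ||| b) + 1 := by
  have := Nat.lor_bit true a false b
  simpa [Nat.bit_val, Nat.mul_comm] using this

theorem odd_land_even (a b : Nat) : (2 * a + 1) &&& (2 * b) = 2 * (a &&& b) := by
  have := Nat.land_bit true a false b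
  simpa [Nat.bit_val, Nat.mul_comm] using this

-- shifting the whole index list by one = descending one bit level
theorem natLoop_succ (k : Nat) (l : List Nat) :
    natLoop (2 * k + 1) (l.map Nat.succ) = 2 * natLoop k l + 1 := by
  induction l with
  | nil =>
      show ((2 * k + 1) <<< 1) ||| 1 = 2 * ((k <<< 1) ||| 1) + 1
      simp only [Nat.shiftLeft_eq, pow_one]
      have h1 : (2 * k + 1) * 2 = 2 * (2 * k + 1) := by ring
      have h2 : k * 2 = 2 * k := by ring
      rw [h1, h2, even_lor_one (2 * k + 1), even_lor_one k]
  | cons i rest ih =>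
      show (if (2 * k + 1) &&& (1 <<< (i + 1)) = 0 then (2 * k + 1) ||| (1 <<< (i + 1))
            else natLoop (2 * k + 1) (rest.map Nat.succ)) = _
      have hsh : (1 : Nat) <<< (i + 1) = 2 * (1 <<< i) := by
        simp [Nat.shiftLeft_eq, pow_succ]; ring
      rw [hsh, odd_land_even k (1 <<< i), odd_lor_even k (1 <<< i)]
      show _ = 2 * (if k &&& (1 <<< i) = 0 then k ||| (1 <<< i) else natLoop k rest) + 1
      by_cases h : k &&& (1 <<< i) = 0
      · rw [if_pos (by omega), if_pos h]
      · rw [if_neg (by omega), if_neg h, ih]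

-- A's scan computes m | (m+1) for every positive m
theorem natLoop_range (m : Nat) (hm : 0 < m) :
    natLoop m (List.range (PySem.Int.bitLength (m : Int))) = m ||| (m + 1) := by
  induction m using Nat.strong_induction_on with
  | _ m ih =>
    have hbl := PySem.Int.bitLength_natCast hm
    rcases Nat.even_or_odd m with ⟨a, ha⟩ | ⟨k, hk⟩
    · -- m even and positive: bit 0 is clear, the loop answers at i = 0
      have ha' : m = 2 * a := by omega
      obtain ⟨t, ht⟩ : ∃ t, PySem.Int.bitLength (m : Int) = t + 1 := ⟨_, by omega⟩
      rw [ht, List.range_succ_eq_map]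
      have hand : m &&& (1 <<< 0) = 0 := by
        rw [show (1:Nat) <<< 0 = 1 from rfl, Nat.and_one_is_mod]; omega
      have h1 : m ||| 1 = m + 1 := by rw [ha']; exact even_lor_one a
      have hres : m ||| (1 <<< 0) = m ||| (m + 1) := by
        calc m ||| (1 <<< 0) = m ||| 1 := rfl
          _ = m ||| (m ||| 1) := by rw [← Nat.lor_assoc]; simp
          _ = m ||| (m + 1) := by rw [h1]
      rw [show natLoop m (0 :: List.map Nat.succ (List.range t))
            = if m &&& (1 <<< 0) = 0 then m ||| (1 <<< 0)
              else natLoop m (List.map Nat.succ (List.range t)) from rfl,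
          if_pos hand, hres]
    · -- m odd: m = 2k + 1
      subst hk
      by_cases hk0 : k = 0
      · subst hk0; decide
      · have hk1 : 0 < k := Nat.pos_of_ne_zero hk0
        have hdiv : (2 * k + 1) / 2 = k := by omega
        rw [hdiv] at hbl
        rw [hbl, List.range_succ_eq_map]
        have hand : ¬ ((2 * k + 1) &&& (1 <<< 0) = 0) := by
          rw [show (1:Nat) <<< 0 = 1 from rfl, Nat.and_one_is_mod]; omega
        rw [show natLoop (2 * k + 1) (0 :: List.map Nat.succ (List.range (PySem.Int.bitLength (k : Int))))
              = if (2 * k + 1) &&& (1 <<< 0) = 0 then (2 * k + 1) ||| (1 <<< 0)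
                else natLoop (2 * k + 1) (List.map Nat.succ (List.range (PySem.Int.bitLength (k : Int)))) from rfl,
            if_neg hand, natLoop_succ, ih k (by omega) hk1]
        rw [show 2 * k + 1 + 1 = 2 * (k + 1) from by ring, odd_lor_even k (k + 1)]

theorem setBit_eq_alt (n : Int) (hn : 0 ≤ n) : setBit n = setBit_alt n := by
  obtain ⟨m, rfl⟩ := Int.eq_ofNat_of_zero_le hn
  by_cases hm : m = 0
  · subst hm; decide
  · have hm' : 0 < m := Nat.pos_of_ne_zero hm
    have h0 : ((m : Int)) ≠ 0 := by exact_mod_cast hm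
    unfold setBit setBit_alt
    rw [if_neg h0, setBitLoop_natCast, natLoop_range m hm']
    have : ((m : Int) + 1) = ((m + 1 : Nat) : Int) := by push_cast; ring
    rw [this, PySem.Int.bor_natCast]

-- ===== VERDICT (by name: the statement is the Claim_ definition above) =====
theorem setBit_spec : Claim_equal_setBit := by
  intro n _ hpre
  unfold Spec_setBit
  exact setBit_eq_alt n hpre
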